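-- pv_equiv track=rewrite | github.com/lilchirpings/PodcastClean | podcast_clean_ui.py | obfuscate_word
-- ===== SOURCE A (Python) =====
-- def obfuscate_word(word):
--     """Mask most alphabetic characters while keeping punctuation intact."""
--     chars = list(word)
--     alpha_positions = [idx for idx, ch in enumerate(chars) if ch.isalpha()]
--     if not alpha_positions:
--         return word
--     if len(alpha_positions) == 1:
--         chars[alpha_positions[0]] = "*"
--         return "".join(chars)
--     if len(alpha_positions) == 2:
--         chars[alpha_positions[1]] = "*"
--         return "".join(chars)
--     for idx in alpha_positions[1:-1]:
--         chars[idx] = "*"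
--     return "".join(chars)
-- ===== SOURCE B (Python) =====
-- def obfuscate_word(word):
--     """Mask most alphabetic characters while keeping punctuation intact."""
--     n = sum(ch.isalpha() for ch in word)
--     if n == 0:
--         return word
--     out = []
--     seen = 0
--     for ch in word:
--         if ch.isalpha():
--             if (seen == 0 and n >= 2) or (seen == n - 1 and n >= 3):
--                 out.append(ch)
--             else:
--                 out.append("*")
--             seen += 1
--         else:
--             out.append(ch)
--     return "".join(out)
-- ===== Notes on version B (the rewrite author's own statement) =====
-- stated objective: simpler
-- what changed: Replaced the alpha-position index list with its len==1/len==2/slice[1:-1] branches and index mutation by a single char pass keeping an alpha counter and one uniform keep condition.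
import Mathlib
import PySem

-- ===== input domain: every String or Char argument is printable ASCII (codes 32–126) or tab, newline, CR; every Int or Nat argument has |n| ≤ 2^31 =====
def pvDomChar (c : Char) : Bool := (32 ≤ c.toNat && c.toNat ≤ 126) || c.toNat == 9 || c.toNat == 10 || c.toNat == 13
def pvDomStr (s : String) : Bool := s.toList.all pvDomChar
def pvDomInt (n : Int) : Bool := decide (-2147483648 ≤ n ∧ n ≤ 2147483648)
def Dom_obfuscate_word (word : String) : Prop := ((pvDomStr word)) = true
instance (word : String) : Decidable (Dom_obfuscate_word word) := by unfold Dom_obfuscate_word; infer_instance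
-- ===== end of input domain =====

-- ===== PORT A =====
-- B replaces A's alpha-position index list and its len-based slice branches by one
-- counter-driven pass with a uniform keep condition (objective: simpler).
def obfuscate_word (word : String) : String :=
  let chars := word.toList
  let alpha_positions :=
    ((PySem.List.enumerate chars 0).filter (fun p => PySem.Chars.isalpha p.2)).map (fun p => p.1)
  if alpha_positions = [] then word
  else if alpha_positions.length = 1 then
    String.ofList (PySem.List.pySetD chars (PySem.List.pyGetD alpha_positions 0 0) '*')
  else if alpha_positions.length = 2 then
    String.ofList (PySem.List.pySetD chars (PySem.List.pyGetD alpha_positions 1 0) '*')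
  else
    String.ofList ((PySem.List.slice alpha_positions (some 1) (some (-1))).foldl
      (fun l i => PySem.List.pySetD l i '*') chars)

-- ===== PORT B =====
-- the loop over the characters, carrying the running count `seen` of alphas already passed
def altGo (n : Nat) (seen : Nat) : List Char → List Char
  | [] => []
  | c :: t =>
    if PySem.Chars.isalpha c then
      (if (seen = 0 ∧ 2 ≤ n) ∨ (seen = n - 1 ∧ 3 ≤ n) then c else '*') :: altGo n (seen + 1) t
    else c :: altGo n seen t

def obfuscate_word_alt (word : String) : String :=
  let n := word.toList.countP PySem.Chars.isalpha
  if n = 0 then word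
  else String.ofList (altGo n 0 word.toList)

-- ===== PRECONDITION & SPEC =====
def Spec_obfuscate_word (word : String) (out : String) : Prop := out = obfuscate_word_alt word
instance (word : String) (out : String) : Decidable (Spec_obfuscate_word word out) := by
  unfold Spec_obfuscate_word; infer_instance

-- ===== CLAIM =====
def Claim_equal_obfuscate_word : Prop := ∀ (word : String), Dom_obfuscate_word word → Spec_obfuscate_word word (obfuscate_word word)

-- ===== LEMMAS AND PROOFS =====

-- Nat-level alpha-position list (proof helper mirroring A's enumerate/filter/map pipeline)
def posN : List Char → List Nat
  | [] => []
  | c :: t => (if PySem.Chars.isalpha c then [0] else []) ++ (posN t).map (· + 1)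

-- A's alpha_positions is posN shifted by the enumerate start and cast to Int
theorem posFrom_eq (cs : List Char) : ∀ s : Int,
    ((PySem.List.enumerate cs s).filter (fun p => PySem.Chars.isalpha p.2)).map (fun p => p.1)
      = (posN cs).map (fun k : Nat => s + (k : Int)) := by
  induction cs with
  | nil => intro s; simp [posN, PySem.List.enumerate_nil]
  | cons c t ih =>
    intro s
    rw [PySem.List.enumerate_cons]
    by_cases h : PySem.Chars.isalpha c
    · simp only [posN, h, if_pos, List.filter_cons, List.map_cons, List.singleton_append,
        decide_true, ih (s + 1), List.map_map]
      refine congrArg₂ _ (by simp) ?_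
      apply List.map_congr_left
      intro k _
      simp only [Function.comp_apply]
      push_cast
      ring
    · simp only [posN, h, if_neg, List.filter_cons, decide_false, List.nil_append,
        ih (s + 1), List.map_map, Bool.false_eq_true, not_false_eq_true]
      apply List.map_congr_left
      intro k _
      simp only [Function.comp_apply]
      push_cast
      ring

theorem length_posN (cs : List Char) : (posN cs).length = cs.countP PySem.Chars.isalpha := by
  induction cs with
  | nil => simp [posN]
  | cons c t ih =>
    by_cases h : PySem.Chars.isalpha c <;>
      simp [posN, h, List.countP_cons, ih, Nat.add_comm]

-- rank characterisation of posN's entries: posN's k-th entry is the position of the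
-- k-th alphabetic character
theorem posN_getElem? (cs : List Char) : ∀ (k j : Nat),
    (posN cs)[k]? = some j ↔
      ∃ _ : j < cs.length, PySem.Chars.isalpha cs[j] = true ∧
        (cs.take j).countP PySem.Chars.isalpha = k := by
  induction cs with
  | nil => intro k j; simp [posN]
  | cons c t ih =>
    intro k j
    by_cases h : PySem.Chars.isalpha c
    · simp only [posN, h, if_pos, List.singleton_append]
      cases k with
      | zero =>
        simp only [List.getElem?_cons_zero, Option.some.injEq]
        constructor
        · rintro rfl
          exact ⟨by simp, by simpa using h, by simp⟩
        · rintro ⟨hj, ha, hc⟩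
          cases j with
          | zero => rfl
          | succ m =>
            exfalso
            rw [List.take_succ_cons, List.countP_cons] at hc
            simp [h] at hc
      | succ k' =>
        simp only [List.getElem?_cons_succ, List.getElem?_map, Option.map_eq_some_iff]
        constructor
        · rintro ⟨j', hj', rfl⟩
          obtain ⟨hlt, ha, hc⟩ := (ih k' j').mp hj'
          refine ⟨by simpa using Nat.succ_lt_succ hlt, by simpa using ha, ?_⟩
          rw [List.take_succ_cons, List.countP_cons]
          simp [h, hc]
        · rintro ⟨hj, ha, hc⟩
          cases j with
          | zero => simp at hc
          | succ m =>
            refine ⟨m, ?_, rfl⟩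
            apply (ih k' m).mpr
            rw [List.take_succ_cons, List.countP_cons] at hc
            simp only [h, if_pos] at hc
            refine ⟨by simp at hj; omega, by simpa using ha, by simp at hc; omega⟩
    · simp only [posN, h, if_neg, List.nil_append, List.getElem?_map,
        Option.map_eq_some_iff, Bool.false_eq_true, not_false_eq_true]
      constructor
      · rintro ⟨j', hj', rfl⟩
        obtain ⟨hlt, ha, hc⟩ := (ih k j').mp hj'
        refine ⟨by simpa using Nat.succ_lt_succ hlt, by simpa using ha, ?_⟩
        rw [List.take_succ_cons, List.countP_cons]
        simp [h, hc]
      · rintro ⟨hj, ha, hc⟩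
        cases j with
        | zero => simp at ha; exact absurd ha h
        | succ m =>
          refine ⟨m, ?_, rfl⟩
          apply (ih k m).mpr
          rw [List.take_succ_cons, List.countP_cons] at hc
          simp only [h] at hc
          refine ⟨by simp at hj; omega, by simpa using ha, by simpa using hc⟩

theorem rank_lt (cs : List Char) (j : Nat) (h : j < cs.length)
    (ha : PySem.Chars.isalpha cs[j] = true) :
    (cs.take j).countP PySem.Chars.isalpha < cs.countP PySem.Chars.isalpha := by
  conv_rhs => rw [← List.take_append_drop j cs]
  rw [List.countP_append, List.drop_eq_getElem_cons h, List.countP_cons]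
  simp [ha]

-- getElem? after setting, as an if
theorem set_getElem? (l : List Char) (i : Nat) (a : Char) (j : Nat) :
    (l.set i a)[j]? = if i = j ∧ i < l.length then some a else l[j]? := by
  rw [List.getElem?_set]; split_ifs <;> simp_all <;> omega

-- getElem? of the fold of set's that A performs
theorem foldl_set_getElem? : ∀ (idxs : List Int) (cs : List Char) (j : Nat),
    (∀ i ∈ idxs, 0 ≤ i) →
    (idxs.foldl (fun l i => PySem.List.pySetD l i '*') cs)[j]? =
      if (j : Int) ∈ idxs ∧ j < cs.length then some '*' else cs[j]? := by
  intro idxs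
  induction idxs with
  | nil => intro cs j _; simp
  | cons i rest ih =>
    intro cs j hnn
    have h0 : 0 ≤ i := hnn i (by simp)
    simp only [List.foldl_cons]
    rw [PySem.List.pySetD_of_nonneg cs '*' h0, ih _ j (fun x hx => hnn x (by simp [hx]))]
    rw [List.length_set, set_getElem? cs i.toNat '*' j]
    have hiff : (i.toNat = j ∧ i.toNat < cs.length) ↔ ((j : Int) = i ∧ j < cs.length) := by
      omega
    simp only [List.mem_cons]
    by_cases hr : ((j : Int) ∈ rest ∧ j < cs.length)
    · rw [if_pos hr, if_pos ⟨Or.inr hr.1, hr.2⟩]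
    · rw [if_neg hr]
      by_cases hi : (j : Int) = i
      · by_cases hl : j < cs.length
        · rw [if_pos (hiff.mpr ⟨hi, hl⟩), if_pos ⟨Or.inl hi, hl⟩]
        · rw [if_neg (fun hc => hl (hiff.mp hc).2), if_neg (fun hc => hl hc.2)]
      · have hno : ¬ (((j : Int) = i ∨ (j : Int) ∈ rest) ∧ j < cs.length) := by
          rintro ⟨h | h, hl⟩
          · exact hi h
          · exact hr ⟨h, hl⟩
        rw [if_neg (fun hc => hi (hiff.mp hc).1), if_neg hno]

-- getElem? of B's pass
theorem altGo_getElem? (n : Nat) : ∀ (cs : List Char) (seen j : Nat),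
    (altGo n seen cs)[j]? = cs[j]?.map (fun c =>
      if PySem.Chars.isalpha c then
        (if (seen + (cs.take j).countP PySem.Chars.isalpha = 0 ∧ 2 ≤ n) ∨
            (seen + (cs.take j).countP PySem.Chars.isalpha = n - 1 ∧ 3 ≤ n) then c else '*')
      else c) := by
  intro cs
  induction cs with
  | nil => intro seen j; simp [altGo]
  | cons c t ih =>
    intro seen j
    by_cases h : PySem.Chars.isalpha c
    · cases j with
      | zero => simp [altGo, h]
      | succ m =>
        simp only [altGo, h, if_pos, List.getElem?_cons_succ, ih (seen + 1) m,
          List.take_succ_cons, List.countP_cons]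
        cases htm : t[m]? with
        | none => simp
        | some d =>
          simp only [Option.map_some, Option.some.injEq]
          simp [h, Nat.add_assoc, Nat.add_comm, Nat.add_left_comm]
    · cases j with
      | zero => simp [altGo, h]
      | succ m =>
        simp only [altGo, h, if_neg, List.getElem?_cons_succ, ih seen m,
          List.take_succ_cons, List.countP_cons, Bool.false_eq_true, not_false_eq_true]
        cases htm : t[m]? with
        | none => simp
        | some d =>
          simp only [Option.map_some, Option.some.injEq]
          simp [h]

theorem slice_one_negone {α : Type} (xs : List α) (h : 1 ≤ xs.length) :
    PySem.List.slice xs (some 1) (some (-1)) = (xs.drop 1).take (xs.length - 2) := by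
  simp [PySem.List.slice, Nat.min_eq_left h]
  rw [show xs.length - 1 - 1 = xs.length - 2 from by omega]
  omega

-- the common shape of the three branch proofs: A's fold equals B's pass as soon as the
-- masked index set is 'alphabetic with a non-kept rank'
theorem branch_eq (cs : List Char) (idxs : List Int) (n : Nat)
    (hnn : ∀ i ∈ idxs, 0 ≤ i)
    (hmem : ∀ (j : Nat), j < cs.length →
      ((j : Int) ∈ idxs ↔ PySem.Chars.isalpha cs[j]! = true ∧
        ¬ (((cs.take j).countP PySem.Chars.isalpha = 0 ∧ 2 ≤ n) ∨
           ((cs.take j).countP PySem.Chars.isalpha = n - 1 ∧ 3 ≤ n)))) :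
    idxs.foldl (fun l i => PySem.List.pySetD l i '*') cs = altGo n 0 cs := by
  apply List.ext_getElem?
  intro j
  rw [foldl_set_getElem? idxs cs j hnn, altGo_getElem? n cs 0 j]
  cases hcj : cs[j]? with
  | none =>
    have hlen : cs.length ≤ j := by
      by_contra hlt
      exact absurd hcj (by simp [List.getElem?_eq_some_iff]; omega)
    simp only [Option.map_none]
    rw [if_neg (by omega)]
  | some d =>
    have hj : j < cs.length := by
      rcases List.getElem?_eq_some_iff.mp hcj with ⟨hh, _⟩; exact hh
    have hd : d = cs[j] := by
      rcases List.getElem?_eq_some_iff.mp hcj with ⟨hh, he⟩; exact he.symm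
    have hbang : cs[j]! = cs[j] := by
      simp [List.getElem!_eq_getElem?_getD, hcj, hd]
    simp only [hmem j hj]
    simp only [Option.map_some, Nat.zero_add, hbang, hd]
    by_cases ha : PySem.Chars.isalpha cs[j] = true
    · by_cases hk : ((cs.take j).countP PySem.Chars.isalpha = 0 ∧ 2 ≤ n) ∨
          ((cs.take j).countP PySem.Chars.isalpha = n - 1 ∧ 3 ≤ n)
      · rw [if_neg (fun hc => hc.1.2 hk), if_pos ha, if_pos hk]
      · rw [if_pos ⟨⟨ha, hk⟩, hj⟩, if_pos ha, if_neg hk]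
    · rw [if_neg (fun hc => ha hc.1.1), if_neg ha]

-- ===== VERDICT (by name: the statement is the Claim_ definition above) =====
theorem obfuscate_word_spec : Claim_equal_obfuscate_word := by
  intro word _
  show obfuscate_word word = obfuscate_word_alt word
  simp only [obfuscate_word, obfuscate_word_alt]
  have hpos : ((PySem.List.enumerate word.toList 0).filter (fun p => PySem.Chars.isalpha p.2)).map (fun p => p.1)
      = (posN word.toList).map (fun k : Nat => (k : Int)) := by
    rw [posFrom_eq]; simp
  rw [hpos]
  set cs := word.toList with hcs
  set n := cs.countP PySem.Chars.isalpha with hn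
  set p := posN cs with hp
  have hlen : p.length = n := length_posN cs
  have hrank_lt : ∀ (j : Nat), j < cs.length → PySem.Chars.isalpha cs[j]! = true →
      (cs.take j).countP PySem.Chars.isalpha < n := by
    intro j hj ha
    have : cs[j]! = cs[j] := by
      simp [List.getElem!_eq_getElem?_getD, List.getElem?_eq_getElem hj]
    exact rank_lt cs j hj (this ▸ ha)
  by_cases h0 : n = 0
  · rw [if_pos (by simp [List.map_eq_nil_iff, ← List.length_eq_zero_iff, hlen, h0]), if_pos h0]
  · rw [if_neg (by simp [List.map_eq_nil_iff, ← List.length_eq_zero_iff, hlen, h0]), if_neg h0]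
    have hmaplen : (p.map (fun k : Nat => (k : Int))).length = n := by simp [hlen]
    by_cases h1 : n = 1
    · rw [if_pos (by rw [hmaplen]; exact h1)]
      obtain ⟨j0, hp1⟩ := List.length_eq_one_iff.mp (hlen.trans h1)
      refine congrArg _ ?_
      have hget : PySem.List.pyGetD (p.map (fun k : Nat => (k : Int))) 0 0 = (j0 : Int) := by
        simp [hp1]
      rw [hget, show PySem.List.pySetD cs (j0 : Int) '*' =
        [(j0 : Int)].foldl (fun l i => PySem.List.pySetD l i '*') cs from rfl]
      apply branch_eq
      · intro i hi; simp at hi; omega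
      · intro j hj
        have hiff : (j : Int) ∈ [(j0 : Int)] ↔ p[0]? = some j := by
          simp [hp1, Nat.cast_inj, eq_comm]
        rw [hiff]
        constructor
        · intro hq
          obtain ⟨hjl, ha, hc⟩ := (posN_getElem? cs 0 j).mp hq
          have : cs[j]! = cs[j] := by
            simp [List.getElem!_eq_getElem?_getD, List.getElem?_eq_getElem hjl]
          exact ⟨this ▸ ha, by omega⟩
        · rintro ⟨ha, _⟩
          have hb : cs[j]! = cs[j] := by
            simp [List.getElem!_eq_getElem?_getD, List.getElem?_eq_getElem hj]
          have hr := hrank_lt j hj ha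
          exact (posN_getElem? cs 0 j).mpr ⟨hj, hb ▸ ha, by omega⟩
    · by_cases h2 : n = 2
      · rw [if_neg (by rw [hmaplen]; omega), if_pos (by rw [hmaplen]; exact h2)]
        obtain ⟨j0, j1, hp2⟩ := List.length_eq_two.mp (hlen.trans h2)
        refine congrArg _ ?_
        have hget : PySem.List.pyGetD (p.map (fun k : Nat => (k : Int))) 1 0 = (j1 : Int) := by
          simp [hp2, PySem.List.pyGetD, PySem.List.pyGet?, PySem.List.pyIdx?]
        rw [hget, show PySem.List.pySetD cs (j1 : Int) '*' =
          [(j1 : Int)].foldl (fun l i => PySem.List.pySetD l i '*') cs from rfl]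
        apply branch_eq
        · intro i hi; simp at hi; omega
        · intro j hj
          have hiff : (j : Int) ∈ [(j1 : Int)] ↔ p[1]? = some j := by
            simp [hp2, Nat.cast_inj, eq_comm]
          rw [hiff]
          constructor
          · intro hq
            obtain ⟨hjl, ha, hc⟩ := (posN_getElem? cs 1 j).mp hq
            have : cs[j]! = cs[j] := by
              simp [List.getElem!_eq_getElem?_getD, List.getElem?_eq_getElem hjl]
            exact ⟨this ▸ ha, by omega⟩
          · rintro ⟨ha, hnk⟩
            have hb : cs[j]! = cs[j] := by
              simp [List.getElem!_eq_getElem?_getD, List.getElem?_eq_getElem hj]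
            have hr := hrank_lt j hj ha
            exact (posN_getElem? cs 1 j).mpr ⟨hj, hb ▸ ha, by omega⟩
      · rw [if_neg (by rw [hmaplen]; omega), if_neg (by rw [hmaplen]; omega)]
        have h3 : 3 ≤ n := by omega
        refine congrArg _ ?_
        have hslice : PySem.List.slice (p.map (fun k : Nat => (k : Int))) (some 1) (some (-1))
            = ((p.drop 1).take (n - 2)).map (fun k : Nat => (k : Int)) := by
          rw [slice_one_negone _ (by simp [hlen]; omega)]
          simp [List.map_take, List.map_drop, List.map_tail, hlen]
        rw [hslice]
        apply branch_eq
        · intro i hi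
          simp only [List.mem_map] at hi
          obtain ⟨k, _, rfl⟩ := hi
          exact Int.natCast_nonneg k
        · intro j hj
          have hb : cs[j]! = cs[j] := by
            simp [List.getElem!_eq_getElem?_getD, List.getElem?_eq_getElem hj]
          have hiff : (j : Int) ∈ ((p.drop 1).take (n - 2)).map (fun k : Nat => (k : Int))
              ↔ ∃ m, m < n - 2 ∧ p[1 + m]? = some j := by
            rw [List.mem_map]
            constructor
            · rintro ⟨k, hk, hkj⟩
              have hkj' : k = j := by omega
              subst hkj'
              rcases List.mem_iff_getElem?.mp hk with ⟨m, hm⟩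
              rw [List.getElem?_take] at hm
              by_cases hmlt : m < n - 2
              · rw [if_pos hmlt, List.getElem?_drop] at hm
                exact ⟨m, hmlt, hm⟩
              · rw [if_neg hmlt] at hm; cases hm
            · rintro ⟨m, hm, hpm⟩
              refine ⟨j, ?_, rfl⟩
              apply List.mem_iff_getElem?.mpr
              refine ⟨m, ?_⟩
              rw [List.getElem?_take, if_pos hm, List.getElem?_drop]
              exact hpm
          rw [hiff]
          constructor
          · rintro ⟨m, hm, hpm⟩
            obtain ⟨hjl, ha, hc⟩ := (posN_getElem? cs (1 + m) j).mp hpm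
            have : cs[j]! = cs[j] := by
              simp [List.getElem!_eq_getElem?_getD, List.getElem?_eq_getElem hjl]
            exact ⟨this ▸ ha, by omega⟩
          · rintro ⟨ha, hnk⟩
            have hr := hrank_lt j hj ha
            refine ⟨(cs.take j).countP PySem.Chars.isalpha - 1, by omega, ?_⟩
            apply (posN_getElem? cs (1 + ((cs.take j).countP PySem.Chars.isalpha - 1)) j).mpr
            exact ⟨hj, hb ▸ ha, by omega⟩
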